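-- pv_equiv track=rewrite | github.com/starbachi/LLM_Interview_Agent | html_generator.py | generate_transcript_html
-- ===== SOURCE A (Python) =====
-- def generate_transcript_html(transcript: list) -> str:
--     """Generate HTML for transcript"""
--     html_parts = []
--
--     for entry in transcript:
--         entry_type = entry.get('type', 'unknown')
--         content = entry.get('content', '')
--
--         if entry_type == 'greeting':
--             html_parts.append(f'''
--             <div class="transcript-item greeting">
--                 <strong>Interviewer Introduction</strong>
--                 {content}
--             </div>
--             ''')
--         elif entry_type == 'question':
--             html_parts.append(f'''
--             <div class="transcript-item question">
--                 <strong>Question</strong>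
--                 {content}
--             </div>
--             ''')
--         elif entry_type == 'answer':
--             html_parts.append(f'''
--             <div class="transcript-item answer">
--                 <strong>Candidate Response</strong>
--                 {content}
--             </div>
--             ''')
--
--     return '\n'.join(html_parts) if html_parts else '<p>No transcript available.</p>'
-- ===== SOURCE B (Python) =====
-- _ENTRY_TYPES = {
--     'greeting': ('greeting', 'Interviewer Introduction'),
--     'question': ('question', 'Question'),
--     'answer': ('answer', 'Candidate Response'),
-- }
--
--
-- def _render(entry):
--     info = _ENTRY_TYPES.get(entry.get('type', 'unknown'))
--     if info is None:
--         return None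
--     css_class, label = info
--     return f'''
--             <div class="transcript-item {css_class}">
--                 <strong>{label}</strong>
--                 {entry.get('content', '')}
--             </div>
--             '''
--
--
-- def generate_transcript_html(transcript: list) -> str:
--     # Sweep the transcript back-to-front, maintaining the final HTML string for the
--     # suffix seen so far (None = nothing rendered yet); the '\n' separators are
--     # spliced in as we go, so no intermediate list of parts and no join exist.
--     result = None
--     for entry in reversed(transcript):
--         head = _render(entry)
--         if head is not None:
--             result = head if result is None else head + '\n' + result
--     return result if result is not None else '<p>No transcript available.</p>'
-- ===== Notes on version B (the rewrite author's own statement) =====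
-- stated objective: alternative
-- what changed: Instead of accumulating a list of parts in a forward loop and joining them at the end, B sweeps the transcript back-to-front maintaining the final HTML string for the suffix directly, splicing each '\n' separator in as it goes (no parts list, no join); rendering uses a type->(css class,label) table with one shared template instead of three duplicated ones.
import Mathlib
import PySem

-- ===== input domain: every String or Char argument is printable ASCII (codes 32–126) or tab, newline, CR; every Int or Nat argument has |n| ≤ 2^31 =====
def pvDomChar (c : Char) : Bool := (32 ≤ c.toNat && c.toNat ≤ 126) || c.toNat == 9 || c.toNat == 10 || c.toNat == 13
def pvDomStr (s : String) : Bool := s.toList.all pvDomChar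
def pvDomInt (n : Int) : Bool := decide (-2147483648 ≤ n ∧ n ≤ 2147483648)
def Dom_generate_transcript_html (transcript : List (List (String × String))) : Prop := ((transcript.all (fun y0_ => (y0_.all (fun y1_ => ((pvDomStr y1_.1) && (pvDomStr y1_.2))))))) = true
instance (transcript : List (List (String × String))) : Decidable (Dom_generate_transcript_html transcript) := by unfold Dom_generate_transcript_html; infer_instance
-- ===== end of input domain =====

-- B sweeps the transcript back-to-front, maintaining the final HTML string for the suffix
-- directly and splicing each '\n' in as it goes (no parts list, no join); table-driven render; same cost.

-- ===== PORT A =====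
-- A's three triple-quoted f-string templates, literal
def pvTmplGreeting (c : String) : String :=
  "\n            <div class=\"transcript-item greeting\">\n                <strong>Interviewer Introduction</strong>\n                " ++ c ++ "\n            </div>\n            "

def pvTmplQuestion (c : String) : String :=
  "\n            <div class=\"transcript-item question\">\n                <strong>Question</strong>\n                " ++ c ++ "\n            </div>\n            "

def pvTmplAnswer (c : String) : String :=
  "\n            <div class=\"transcript-item answer\">\n                <strong>Candidate Response</strong>\n                " ++ c ++ "\n            </div>\n            "

-- body of A's for-loop: the if/elif chain appending to html_parts
def pvStepA (acc : List String) (entry : List (String × String)) : List String :=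
  let entryType := (PySem.Dict.mk entry).getD "type" "unknown"
  let content := (PySem.Dict.mk entry).getD "content" ""
  if entryType = "greeting" then acc ++ [pvTmplGreeting content]
  else if entryType = "question" then acc ++ [pvTmplQuestion content]
  else if entryType = "answer" then acc ++ [pvTmplAnswer content]
  else acc

def generate_transcript_html (transcript : List (List (String × String))) : String :=
  let htmlParts := transcript.foldl pvStepA []
  if htmlParts.isEmpty then "<p>No transcript available.</p>"
  else PySem.Str.join "\n" htmlParts

-- ===== PORT B =====
-- the _ENTRY_TYPES lookup table: type → (css class, label)
def pvEntryTypes : List (String × (String × String)) :=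
  [("greeting", ("greeting", "Interviewer Introduction")),
   ("question", ("question", "Question")),
   ("answer", ("answer", "Candidate Response"))]

-- _render: one shared template, or None for unknown types
def pvRender (entry : List (String × String)) : Option String :=
  match pvEntryTypes.lookup ((PySem.Dict.mk entry).getD "type" "unknown") with
  | none => none
  | some (cssClass, label) =>
      some ("\n            <div class=\"transcript-item " ++ cssClass ++ "\">\n                <strong>"
        ++ label ++ "</strong>\n                "
        ++ (PySem.Dict.mk entry).getD "content" ""
        ++ "\n            </div>\n            ")

-- body of B's reversed loop: splice the rendered entry onto the suffix string built so far
def pvStepB (result : Option String) (entry : List (String × String)) : Option String :=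
  match pvRender entry with
  | none => result
  | some h =>
    match result with
    | none => some h
    | some t => some (h ++ "\n" ++ t)

def generate_transcript_html_alt (transcript : List (List (String × String))) : String :=
  match transcript.reverse.foldl pvStepB none with
  | some s => s
  | none => "<p>No transcript available.</p>"

-- ===== PRECONDITION & SPEC =====
def Spec_generate_transcript_html (transcript : List (List (String × String))) (out : String) : Prop := out = generate_transcript_html_alt transcript
instance (transcript : List (List (String × String))) (out : String) : Decidable (Spec_generate_transcript_html transcript out) := by unfold Spec_generate_transcript_html; infer_instance

-- ===== CLAIM (what is proved, stated in full; the proofs are below) =====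
def Claim_equal_generate_transcript_html : Prop := ∀ (transcript : List (List (String × String))), Dom_generate_transcript_html transcript → Spec_generate_transcript_html transcript (generate_transcript_html transcript)

-- ===== LEMMAS AND PROOFS =====

-- one loop iteration of A = appending what B's _render yields for that entry
theorem pvStepA_eq_render (acc : List String) (entry : List (String × String)) :
    pvStepA acc entry = acc ++ (pvRender entry).toList := by
  unfold pvStepA pvRender
  set t := (PySem.Dict.mk entry).getD "type" "unknown" with ht
  by_cases h1 : t = "greeting"
  · simp [h1, pvEntryTypes, pvTmplGreeting]
  · have e1 : (t == "greeting") = false := by simp [h1]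
    by_cases h2 : t = "question"
    · simp [h2, pvEntryTypes, List.lookup, pvTmplQuestion]
    · have e2 : (t == "question") = false := by simp [h2]
      by_cases h3 : t = "answer"
      · simp [h3, pvEntryTypes, List.lookup, pvTmplAnswer]
      · have e3 : (t == "answer") = false := by simp [h3]
        simp [pvEntryTypes, List.lookup, e1, e2, e3, h1, h2, h3]

theorem pvFoldA_eq_filterMap (transcript : List (List (String × String))) (acc : List String) :
    transcript.foldl pvStepA acc = acc ++ transcript.filterMap pvRender := by
  induction transcript generalizing acc with
  | nil => simp
  | cons e rest ih =>
      simp only [List.foldl_cons, List.filterMap_cons, ih, pvStepA_eq_render]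
      cases pvRender e <;> simp

-- B's reversed loop computes exactly the join of the filtered parts (none iff no parts)
theorem pvRevLoop_eq_join (transcript : List (List (String × String))) :
    transcript.reverse.foldl pvStepB none =
      match transcript.filterMap pvRender with
      | [] => none
      | l => some (PySem.Str.join "\n" l) := by
  rw [List.foldl_reverse]
  induction transcript with
  | nil => simp
  | cons e rest ih =>
      simp only [List.foldr_cons, List.filterMap_cons, ih]
      cases he : pvRender e with
      | none => simp [pvStepB, he]
      | some h =>
          cases hl : rest.filterMap pvRender with
          | nil => simp [pvStepB, he, PySem.Str.join]
          | cons t r =>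
              simp only [pvStepB, he, PySem.Str.join, List.map_cons]
              rw [PySem.Chars.join_cons_cons, String.ofList_append, String.ofList_append,
                  String.ofList_toList]
              simp

-- ===== VERDICT (by name: the statement is the Claim_ definition above) =====
theorem generate_transcript_html_spec : Claim_equal_generate_transcript_html := by
  intro transcript _
  unfold Spec_generate_transcript_html generate_transcript_html generate_transcript_html_alt
  rw [pvFoldA_eq_filterMap, pvRevLoop_eq_join]
  simp only [List.nil_append]
  cases transcript.filterMap pvRender <;> simp
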